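-- pv_equiv track=rewrite | github.com/ryanjakecherian/TritNet | python/propagate_verification.py | expand_horizontal
-- ===== SOURCE A (Python) =====
-- word_size = 3
--
-- def expand_horizontal(input):
--
--     output = [0] * (len(input)*word_size)
--
--     for i in range(len(input)):
--
--         rem = input[i]
--
--         for n in range(word_size):
--
--             output[i*word_size + ((word_size-1)-n)] = rem % 2
--             rem = rem // 2
--
--     return output
-- ===== SOURCE B (Python) =====
-- word_size = 3
--
-- def expand_horizontal(input):
--     # column-major: halve the whole list stage by stage, collecting one bit
--     # column per stage, then transpose (zip) the columns back into row order
--     low = [x % 2 for x in input]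
--     half = [x // 2 for x in input]
--     mid = [x % 2 for x in half]
--     high = [x // 2 % 2 for x in half]
--     output = []
--     for triple in zip(high, mid, low):
--         output += triple
--     return output
-- ===== Notes on version B (the rewrite author's own statement) =====
-- stated objective: alternative
-- what changed: Replaces A's row-major fill (per element, an inner rem-accumulator loop writing bits into a preallocated array by reverse index arithmetic) with a column-major staged computation: whole-list halving passes produce the three bit columns, which are then transposed with zip into the row-ordered output.
import Mathlib
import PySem

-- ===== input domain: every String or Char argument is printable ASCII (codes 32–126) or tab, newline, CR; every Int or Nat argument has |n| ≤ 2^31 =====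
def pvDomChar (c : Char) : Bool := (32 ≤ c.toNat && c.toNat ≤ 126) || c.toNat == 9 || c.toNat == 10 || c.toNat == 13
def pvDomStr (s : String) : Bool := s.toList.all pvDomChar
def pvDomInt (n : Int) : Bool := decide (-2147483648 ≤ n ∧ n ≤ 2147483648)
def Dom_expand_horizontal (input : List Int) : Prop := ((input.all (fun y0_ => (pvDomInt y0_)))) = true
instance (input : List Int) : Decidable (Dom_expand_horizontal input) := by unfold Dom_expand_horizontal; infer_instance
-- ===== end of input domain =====

-- B replaces A's row-major fill (inner rem loop writing into a preallocated array)
-- with column-major staged halving passes plus a zip transpose (alternative; same cost).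

-- word_size = 3
def pvWordSize : Int := 3

-- ===== PORT A =====
-- output[i*word_size + ((word_size-1)-n)] = rem % 2 ; rem = rem // 2
-- the write index i*3 + (2-n) is nonnegative for i,n in their ranges, so .toNat is exact;
-- input[i] with i ∈ range(len(input)) is always in range, so pyGetD is exact there
def expand_horizontal (input : List Int) : List Int :=
  let output := List.replicate (input.length * 3) (0 : Int)
  (PySem.List.pyRange 0 (input.length : Int) 1).foldl
    (fun output i =>
      let rem := PySem.List.pyGetD input i 0
      ((PySem.List.pyRange 0 pvWordSize 1).foldl
        (fun st n =>
          (st.1.set ((i * pvWordSize + ((pvWordSize - 1) - n)).toNat) (PySem.Int.mod st.2 2),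
           PySem.Int.floordiv st.2 2))
        (output, rem)).1)
    output

-- ===== PORT B =====
-- low/half/mid/high are B's four list comprehensions; python's zip of three
-- equal-length lists is List.zip nested, and 'output += triple' is the foldl append
def expand_horizontal_alt (input : List Int) : List Int :=
  let low := input.map (fun x => PySem.Int.mod x 2)
  let half := input.map (fun x => PySem.Int.floordiv x 2)
  let mid := half.map (fun x => PySem.Int.mod x 2)
  let high := half.map (fun x => PySem.Int.mod (PySem.Int.floordiv x 2) 2)
  (high.zip (mid.zip low)).foldl (fun output t => output ++ [t.1, t.2.1, t.2.2]) []

-- ===== PRECONDITION & SPEC =====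
def Spec_expand_horizontal (input : List Int) (out : List Int) : Prop := out = expand_horizontal_alt input
instance (input : List Int) (out : List Int) : Decidable (Spec_expand_horizontal input out) := by unfold Spec_expand_horizontal; infer_instance

-- ===== CLAIM (what is proved, stated in full; the proofs are below) =====
def Claim_equal_expand_horizontal : Prop := ∀ (input : List Int), Dom_expand_horizontal input → Spec_expand_horizontal input (expand_horizontal input)

-- ===== LEMMAS AND PROOFS =====

-- the three bits of x, big-endian (one transposed row of B's columns)
def pvBits (x : Int) : List Int :=
  [PySem.Int.mod (PySem.Int.floordiv (PySem.Int.floordiv x 2) 2) 2,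
   PySem.Int.mod (PySem.Int.floordiv x 2) 2,
   PySem.Int.mod x 2]

-- A's outer-loop body, named for the proofs (definitionally the port's lambda)
def pvAStep (input : List Int) (output : List Int) (i : Int) : List Int :=
  let rem := PySem.List.pyGetD input i 0
  ((PySem.List.pyRange 0 pvWordSize 1).foldl
    (fun st n =>
      (st.1.set ((i * pvWordSize + ((pvWordSize - 1) - n)).toNat) (PySem.Int.mod st.2 2),
       PySem.Int.floordiv st.2 2))
    (output, rem)).1

lemma pvA_as_fold (input : List Int) :
    expand_horizontal input
      = (PySem.List.pyRange 0 (input.length : Int) 1).foldl (pvAStep input)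
          (List.replicate (input.length * 3) (0 : Int)) := rfl

-- B's zip-transpose of the four column passes is exactly the rowwise flatMap of pvBits
lemma pvAlt_eq_flatMap (input : List Int) :
    expand_horizontal_alt input = input.flatMap pvBits := by
  unfold expand_horizontal_alt
  rw [PySem.List.foldl_append_eq_flatMap]
  induction input with
  | nil => rfl
  | cons x xs ih =>
    simp only [List.map_cons, List.zip_cons_cons, List.flatMap_cons, List.nil_append] at *
    rw [ih]; rfl

-- evaluation of A's inner loop at outer index k
lemma pvStep_eval (input : List Int) (out : List Int) (k : Nat) :
    pvAStep input out (k : Int)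
      = ((out.set (3*k+2) (PySem.Int.mod (PySem.List.pyGetD input (k : Int) 0) 2)).set (3*k+1)
          (PySem.Int.mod (PySem.Int.floordiv (PySem.List.pyGetD input (k : Int) 0) 2) 2)).set (3*k)
          (PySem.Int.mod (PySem.Int.floordiv (PySem.Int.floordiv (PySem.List.pyGetD input (k : Int) 0) 2) 2) 2) := by
  unfold pvAStep
  have h : PySem.List.pyRange 0 pvWordSize 1 = [0, 1, 2] := rfl
  rw [h]
  simp only [List.foldl]
  have e2 : ((k : Int) * pvWordSize + ((pvWordSize - 1) - 0)).toNat = 3*k+2 := by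
    simp only [pvWordSize]; omega
  have e1 : ((k : Int) * pvWordSize + ((pvWordSize - 1) - 1)).toNat = 3*k+1 := by
    simp only [pvWordSize]; omega
  have e0 : ((k : Int) * pvWordSize + ((pvWordSize - 1) - 2)).toNat = 3*k := by
    simp only [pvWordSize]; omega
  rw [e2, e1, e0]

-- writing one 3-block then taking through it
lemma pvTakeSetBlock (out : List Int) (p : Nat) (b0 b1 b2 : Int) (h : 3*p+3 ≤ out.length) :
    ((((out.set (3*p+2) b2).set (3*p+1) b1).set (3*p) b0).take (3*p+3))
      = out.take (3*p) ++ [b0, b1, b2] := by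
  apply List.ext_getElem
  · simp; omega
  · intro j h1 h2
    have hlen3 : (List.take (3*p) out).length = 3*p := by simp [List.length_take]; omega
    by_cases hj : j < 3*p
    · rw [List.getElem_append_left (by omega : j < (List.take (3*p) out).length)]
      rw [List.getElem_take, List.getElem_take,
        List.getElem_set_ne (by omega), List.getElem_set_ne (by omega),
        List.getElem_set_ne (by omega)]
    · have hj3 : j = 3*p ∨ j = 3*p+1 ∨ j = 3*p+2 := by
        simp only [List.length_take, List.length_set] at h1; omega
      rw [List.getElem_append_right (by omega : (List.take (3*p) out).length ≤ j),
        List.getElem_take]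
      rcases hj3 with rfl | rfl | rfl
      · rw [List.getElem_set_self]
        simp [hlen3]
      · rw [List.getElem_set_ne (by omega), List.getElem_set_self]
        simp [hlen3]
      · rw [List.getElem_set_ne (by omega), List.getElem_set_ne (by omega),
          List.getElem_set_self]
        simp [hlen3]

-- main invariant: folding A's body over indices k..len-1 fills the tail with B's blocks
lemma pvMain (input : List Int) : ∀ (rest : List Int) (k : Nat) (out : List Int),
    input.drop k = rest → out.length = 3 * input.length →
    (PySem.List.pyRange (k : Int) (input.length : Int) 1).foldl (pvAStep input) out
      = out.take (3*k) ++ rest.flatMap pvBits := by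
  intro rest
  induction rest with
  | nil =>
    intro k out hdrop hlen
    have hk : input.length ≤ k := by
      by_contra hlt
      have := List.drop_eq_nil_iff.mp hdrop
      omega
    rw [PySem.List.pyRange_one_eq_nil (by exact_mod_cast hk)]
    simp [List.take_of_length_le (by omega : out.length ≤ 3*k)]
  | cons x rest' ih =>
    intro k out hdrop hlen
    have hk : k < input.length := by
      by_contra hge
      rw [List.drop_eq_nil_iff.mpr (by omega)] at hdrop
      simp at hdrop
    have hsplit : input[k] :: input.drop (k+1) = x :: rest' := by
      rw [List.getElem_cons_drop]; exact hdrop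
    have hx : input[k] = x := (List.cons.injEq _ _ _ _ ▸ hsplit).1
    have hrest : input.drop (k+1) = rest' := (List.cons.injEq _ _ _ _ ▸ hsplit).2
    rw [PySem.List.pyRange_one_cons (by exact_mod_cast hk)]
    simp only [List.foldl_cons]
    rw [pvStep_eval]
    have hget : PySem.List.pyGetD input (k : Int) 0 = x := by
      rw [PySem.List.pyGetD_natCast, List.getD_eq_getElem _ _ hk, hx]
    rw [hget]
    have hcast : ((k : Int) + 1) = ((k + 1 : Nat) : Int) := by push_cast; ring
    rw [hcast, ih (k+1) _ hrest (by simp [hlen])]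
    rw [(by ring : 3*(k+1) = 3*k+3),
      pvTakeSetBlock out k _ _ _ (by simp only [hlen]; omega)]
    simp [pvBits]

-- ===== VERDICT (by name: the statement is the Claim_ definition above) =====
theorem expand_horizontal_spec : Claim_equal_expand_horizontal := by
  intro input _
  unfold Spec_expand_horizontal
  rw [pvAlt_eq_flatMap, pvA_as_fold]
  have h0 : (0 : Int) = ((0 : Nat) : Int) := rfl
  rw [h0, pvMain input input 0 _ (by simp) (by simp [Nat.mul_comm])]
  simp
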